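-- pv_equiv track=rewrite | github.com/gbayres/health_truth | app/database/processDatabase/factChecker.py | tratarVereditos
-- ===== SOURCE A (Python) =====
-- def tratarVereditos(vereditos):
--
--     new_dict = {}
--
--     falso = ["mentira", "falso", "errado", "fake", "mentiroso"]
--     enganoso = ["enganador", "impreciso", "enganoso", "exagerado", "descontextualizado"]
--     verdadeiro = ["verdadeiro", "verdade", "correto", "certo"]
--
--     for i in falso:
--         for key, value in vereditos.items():
--             if value.lower().startswith(i):
--                 new_dict[key] = "Falso"
--
--     for i in enganoso:
--         for key, value in vereditos.items():
--             if value.lower().startswith(i):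
--                 new_dict[key] = "Enganoso"
--
--     for i in verdadeiro:
--         for key, value in vereditos.items():
--             if value.lower().startswith(i):
--                 new_dict[key] = "Verdadeiro"
--
--     return new_dict
-- ===== SOURCE B (Python) =====
-- FALSO = ["mentira", "falso", "errado", "fake", "mentiroso"]
-- ENGANOSO = ["enganador", "impreciso", "enganoso", "exagerado", "descontextualizado"]
-- VERDADEIRO = ["verdadeiro", "verdade", "correto", "certo"]
--
--
-- def _classificar(texto):
--     low = texto.lower()
--     if any(low.startswith(w) for w in VERDADEIRO):
--         return "Verdadeiro"
--     if any(low.startswith(w) for w in ENGANOSO):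
--         return "Enganoso"
--     if any(low.startswith(w) for w in FALSO):
--         return "Falso"
--     return None
--
--
-- def tratarVereditos(vereditos):
--     new_dict = {}
--     for key, value in vereditos.items():
--         rotulo = _classificar(value)
--         if rotulo is not None:
--             new_dict[key] = rotulo
--     return new_dict
-- ===== Notes on version B (the rewrite author's own statement) =====
-- stated objective: simpler
-- what changed: A makes fourteen passes over the dict (one per keyword, grouped in three category loops) and relies on later dict overwrites to settle the label; B classifies each value once in a single pass over the items and inserts its label directly. Pre_ excludes dicts whose matching values occur out of A's keyword-scan order: both programs then return the same key-to-value mapping but in different dict insertion orders (A's grouped by keyword position, B's in input order), an order that is an accident of dict insertion and that neither behaviour specifies.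
import Mathlib
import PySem

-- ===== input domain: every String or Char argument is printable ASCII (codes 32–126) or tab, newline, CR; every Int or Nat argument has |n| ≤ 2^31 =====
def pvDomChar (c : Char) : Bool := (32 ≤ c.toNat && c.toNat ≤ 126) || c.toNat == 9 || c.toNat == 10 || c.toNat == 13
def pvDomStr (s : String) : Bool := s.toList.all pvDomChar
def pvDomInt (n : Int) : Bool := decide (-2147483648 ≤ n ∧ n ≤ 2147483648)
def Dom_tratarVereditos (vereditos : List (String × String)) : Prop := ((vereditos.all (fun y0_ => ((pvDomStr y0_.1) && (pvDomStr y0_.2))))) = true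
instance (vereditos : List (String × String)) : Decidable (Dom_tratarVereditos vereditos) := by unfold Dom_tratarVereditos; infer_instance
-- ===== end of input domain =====

-- B replaces A's fourteen keyword-outer passes over the dict by ONE pass over the
-- items that classifies each value once and inserts its label directly (simpler);
-- Pre_ excludes inputs on which the two result dicts carry the same mapping in a
-- different accidental insertion order.


-- ===== PORT A =====
def fcFalso : List String := ["mentira", "falso", "errado", "fake", "mentiroso"]
def fcEnganoso : List String := ["enganador", "impreciso", "enganoso", "exagerado", "descontextualizado"]
def fcVerdadeiro : List String := ["verdadeiro", "verdade", "correto", "certo"]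

-- one 'for i in <kws>: for key, value in vereditos.items(): …' block of A
def fcPass (kws : List String) (label : String) (vereditos : List (String × String))
    (d : PySem.Dict String String) : PySem.Dict String String :=
  kws.foldl (fun d i =>
    vereditos.foldl (fun d kv =>
      if PySem.Str.startswith (PySem.Str.lower kv.2) i then d.insert kv.1 label else d) d) d

def tratarVereditos (vereditos : List (String × String)) : List (String × String) :=
  (fcPass fcVerdadeiro "Verdadeiro" vereditos
    (fcPass fcEnganoso "Enganoso" vereditos
      (fcPass fcFalso "Falso" vereditos PySem.Dict.empty))).items

-- ===== PORT B =====
-- Source B's helper _classificar: lower once, then the three any(...) prefix tests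
def fcClassificar (texto : String) : Option String :=
  let low := PySem.Str.lower texto
  if fcVerdadeiro.any (fun w => PySem.Str.startswith low w) then some "Verdadeiro"
  else if fcEnganoso.any (fun w => PySem.Str.startswith low w) then some "Enganoso"
  else if fcFalso.any (fun w => PySem.Str.startswith low w) then some "Falso"
  else none

-- Source B's single 'for key, value in vereditos.items():' loop
def tratarVereditos_alt (vereditos : List (String × String)) : List (String × String) :=
  (vereditos.foldl (fun d kv =>
    match fcClassificar kv.2 with
    | some rotulo => d.insert kv.1 rotulo
    | none => d) PySem.Dict.empty).items

-- ===== PRECONDITION & SPEC =====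
-- A's fourteen keywords in A's scan order, with their labels (used by Pre_ and the proofs)
def fcKeywords : List (String × String) :=
  [("mentira", "Falso"), ("falso", "Falso"), ("errado", "Falso"), ("fake", "Falso"),
   ("mentiroso", "Falso"),
   ("enganador", "Enganoso"), ("impreciso", "Enganoso"), ("enganoso", "Enganoso"),
   ("exagerado", "Enganoso"), ("descontextualizado", "Enganoso"),
   ("verdadeiro", "Verdadeiro"), ("verdade", "Verdadeiro"), ("correto", "Verdadeiro"),
   ("certo", "Verdadeiro")]

-- the position of the first keyword that is a prefix of low, with its label
def fcFirstHit (low : String) : Option (Nat × String) :=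
  (fcKeywords.zipIdx).findSome? (fun pj =>
    if PySem.Str.startswith low pj.1.1 then some (pj.2, pj.1.2) else none)

-- the first-matching-keyword positions of the matching items, in input order
def fcRanks (l : List (String × String)) : List Nat :=
  l.filterMap (fun kv => (fcFirstHit (PySem.Str.lower kv.2)).map Prod.fst)

-- Pre_ asks for distinct keys (automatic for a Python dict argument) and for the
-- matching values to occur in A's keyword-scan order: on the excluded inputs both
-- programs return the same key-to-value mapping, merely in two different accidental
-- dict insertion orders (A's grouped by keyword position, B's the input order).
def Pre_tratarVereditos (vereditos : List (String × String)) : Prop :=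
  (vereditos.map Prod.fst).Nodup ∧ (fcRanks vereditos).Pairwise (· ≤ ·)
instance (vereditos : List (String × String)) : Decidable (Pre_tratarVereditos vereditos) := by
  unfold Pre_tratarVereditos; infer_instance

def pvWitness_tratarVereditos : (List (String × String)) :=
  [("a", "Mentira!"), ("b", "enganoso?"), ("c", "verdade"), ("d", "sem veredito")]

def Spec_tratarVereditos (vereditos : List (String × String)) (out : List (String × String)) : Prop := out = tratarVereditos_alt vereditos
instance (vereditos : List (String × String)) (out : List (String × String)) : Decidable (Spec_tratarVereditos vereditos out) := by unfold Spec_tratarVereditos; infer_instance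

-- ===== CLAIM (what is proved, stated in full; the proofs are below) =====
def Claim_equal_tratarVereditos : Prop := ∀ (vereditos : List (String × String)), Dom_tratarVereditos vereditos → Pre_tratarVereditos vereditos → Spec_tratarVereditos vereditos (tratarVereditos vereditos)

-- ===== LEMMAS AND PROOFS =====

-- generalisation of fcFirstHit used for induction (offset runs through zipIdx)
def fcAux (ks : List (String × String)) (off : Nat) (low : String) : Option (Nat × String) :=
  (ks.zipIdx off).findSome? (fun pj =>
    if PySem.Str.startswith low pj.1.1 then some (pj.2, pj.1.2) else none)

lemma fcAux_cons (p : String × String) (ks : List (String × String)) (off : Nat) (low : String) :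
    fcAux (p :: ks) off low =
      if PySem.Str.startswith low p.1 then some (off, p.2) else fcAux ks (off + 1) low := by
  cases h : PySem.Str.startswith low p.1 <;>
    simp only [fcAux, List.zipIdx_cons, List.findSome?_cons, h] <;> rfl

lemma fcFirstHit_eq_fcAux (low : String) : fcFirstHit low = fcAux fcKeywords 0 low := rfl

-- S1: a hit names a real keyword that matches
lemma fcAux_spec (ks : List (String × String)) (off : Nat) (low : String) (j : Nat) (lab : String)
    (h : fcAux ks off low = some (j, lab)) :
    off ≤ j ∧ ∃ kw, ks[j - off]? = some (kw, lab) ∧ PySem.Str.startswith low kw = true := by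
  induction ks generalizing off with
  | nil => simp [fcAux] at h
  | cons p ks ih =>
    rw [fcAux_cons] at h
    by_cases hs : PySem.Str.startswith low p.1 = true
    · rw [if_pos hs] at h
      injection h with h'
      injection h' with h1 h2
      subst h1; subst h2
      exact ⟨le_refl _, p.1, by simp, hs⟩
    · rw [if_neg hs] at h
      obtain ⟨h1, ⟨kw, h2, h3⟩⟩ := ih (off + 1) h
      refine ⟨by omega, kw, ?_, h3⟩
      have : j - off = (j - (off + 1)) + 1 := by omega
      rw [this, List.getElem?_cons_succ]
      exact h2

-- S2: no hit means no keyword matches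
lemma fcAux_none (ks : List (String × String)) (off : Nat) (low : String)
    (h : fcAux ks off low = none) :
    ∀ p ∈ ks, PySem.Str.startswith low p.1 = false := by
  induction ks generalizing off with
  | nil => intro p hp; simp at hp
  | cons q ks ih =>
    rw [fcAux_cons] at h
    by_cases hs : PySem.Str.startswith low q.1 = true
    · rw [if_pos hs] at h; exact absurd h (by simp)
    · rw [if_neg hs] at h
      intro p hp
      rcases List.mem_cons.mp hp with rfl | hp'
      · exact Bool.eq_false_iff.mpr hs
      · exact ih (off + 1) h p hp'

-- S3: a matching keyword guarantees a hit no later than it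
lemma fcAux_some_of_match (ks : List (String × String)) (off : Nat) (low : String) (n : Nat)
    (kw lab : String) (hoff : off ≤ n) (hget : ks[n - off]? = some (kw, lab))
    (hsw : PySem.Str.startswith low kw = true) :
    ∃ j lab', fcAux ks off low = some (j, lab') ∧ j ≤ n := by
  induction ks generalizing off with
  | nil => simp at hget
  | cons p ks ih =>
    rw [fcAux_cons]
    by_cases hs : PySem.Str.startswith low p.1 = true
    · exact ⟨off, p.2, if_pos hs, hoff⟩
    · by_cases hno : n = off
      · subst hno
        simp only [Nat.sub_self, List.getElem?_cons_zero] at hget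
        injection hget with h'
        have h1 : kw = p.1 := (congrArg Prod.fst h').symm
        rw [h1] at hsw
        exact absurd hsw hs
      · have : n - off = (n - (off + 1)) + 1 := by omega
        rw [this, List.getElem?_cons_succ] at hget
        obtain ⟨j, lab', hj, hjn⟩ := ih (off + 1) (by omega) hget
        exact ⟨j, lab', by rw [if_neg hs]; exact hj, hjn⟩

lemma fcFirstHit_spec (low : String) (j : Nat) (lab : String)
    (h : fcFirstHit low = some (j, lab)) :
    ∃ kw, fcKeywords[j]? = some (kw, lab) ∧ PySem.Str.startswith low kw = true := by
  have := fcAux_spec fcKeywords 0 low j lab (by rwa [← fcFirstHit_eq_fcAux])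
  simpa using this.2

lemma fcFirstHit_lt (low : String) (j : Nat) (lab : String)
    (h : fcFirstHit low = some (j, lab)) : j < 14 := by
  obtain ⟨kw, hget, _⟩ := fcFirstHit_spec low j lab h
  have := List.getElem?_eq_some_iff.mp hget
  simpa [fcKeywords] using this.1

lemma fcFirstHit_none (low : String) (h : fcFirstHit low = none) :
    ∀ p ∈ fcKeywords, PySem.Str.startswith low p.1 = false :=
  fcAux_none fcKeywords 0 low (by rwa [← fcFirstHit_eq_fcAux])

lemma fcFirstHit_some_of_match (low : String) (n : Nat) (kw lab : String)
    (hget : fcKeywords[n]? = some (kw, lab)) (hsw : PySem.Str.startswith low kw = true) :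
    ∃ j lab', fcFirstHit low = some (j, lab') ∧ j ≤ n := by
  rw [fcFirstHit_eq_fcAux]
  exact fcAux_some_of_match fcKeywords 0 low n kw lab (Nat.zero_le _) (by simpa using hget) hsw

-- no keyword of one category is a prefix of a keyword of another category (finite check)
lemma fcNoCross : ∀ p ∈ fcKeywords, ∀ q ∈ fcKeywords,
    p.1.toList <+: q.1.toList → p.2 = q.2 := by decide

-- two keywords matching the same string carry the same label
lemma fcCat (low : String) (kw1 lab1 kw2 lab2 : String)
    (h1 : (kw1, lab1) ∈ fcKeywords) (h2 : (kw2, lab2) ∈ fcKeywords)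
    (s1 : PySem.Str.startswith low kw1 = true) (s2 : PySem.Str.startswith low kw2 = true) :
    lab1 = lab2 := by
  have hp1 : kw1.toList <+: low.toList := by
    rw [PySem.Str.startswith_eq] at s1
    exact (PySem.Chars.startswith_iff _ _).mp s1
  have hp2 : kw2.toList <+: low.toList := by
    rw [PySem.Str.startswith_eq] at s2
    exact (PySem.Chars.startswith_iff _ _).mp s2
  rcases List.prefix_or_prefix_of_prefix hp1 hp2 with hp | hp
  · exact fcNoCross (kw1, lab1) h1 (kw2, lab2) h2 hp
  · exact (fcNoCross (kw2, lab2) h2 (kw1, lab1) h1 hp).symm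

-- the three category lists versus the labelled keyword list (finite checks)
lemma fcMemV : ∀ w ∈ fcVerdadeiro, (w, "Verdadeiro") ∈ fcKeywords := by decide
lemma fcMemE : ∀ w ∈ fcEnganoso, (w, "Enganoso") ∈ fcKeywords := by decide
lemma fcMemF : ∀ w ∈ fcFalso, (w, "Falso") ∈ fcKeywords := by decide
lemma fcLabelV : ∀ p ∈ fcKeywords, p.2 = "Verdadeiro" → p.1 ∈ fcVerdadeiro := by decide
lemma fcLabelE : ∀ p ∈ fcKeywords, p.2 = "Enganoso" → p.1 ∈ fcEnganoso := by decide
lemma fcLabelF : ∀ p ∈ fcKeywords, p.2 = "Falso" → p.1 ∈ fcFalso := by decide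
lemma fcLabelCases : ∀ p ∈ fcKeywords,
    p.2 = "Falso" ∨ p.2 = "Enganoso" ∨ p.2 = "Verdadeiro" := by decide

-- B's classifier computes exactly the label of the first matching keyword
lemma fcClassificar_eq (texto : String) :
    fcClassificar texto = (fcFirstHit (PySem.Str.lower texto)).map Prod.snd := by
  cases h : fcFirstHit (PySem.Str.lower texto) with
  | none =>
    have hall := fcFirstHit_none _ h
    have hv : fcVerdadeiro.any (fun w => PySem.Str.startswith (PySem.Str.lower texto) w) = false := by
      rw [List.any_eq_false]
      intro w hw
      simpa using hall (w, "Verdadeiro") (fcMemV w hw)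
    have he : fcEnganoso.any (fun w => PySem.Str.startswith (PySem.Str.lower texto) w) = false := by
      rw [List.any_eq_false]
      intro w hw
      simpa using hall (w, "Enganoso") (fcMemE w hw)
    have hf : fcFalso.any (fun w => PySem.Str.startswith (PySem.Str.lower texto) w) = false := by
      rw [List.any_eq_false]
      intro w hw
      simpa using hall (w, "Falso") (fcMemF w hw)
    simp only [fcClassificar, hv, he, hf]
    simp
  | some jl =>
    obtain ⟨j, lab⟩ := jl
    obtain ⟨kw, hget, hsw⟩ := fcFirstHit_spec _ _ _ h
    have hmem : (kw, lab) ∈ fcKeywords := List.mem_of_getElem? hget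
    have hsame : ∀ w lab', (w, lab') ∈ fcKeywords →
        PySem.Str.startswith (PySem.Str.lower texto) w = true → lab' = lab := by
      intro w lab' hm hs
      exact fcCat (PySem.Str.lower texto) w lab' kw lab hm hmem hs hsw
    rcases fcLabelCases (kw, lab) hmem with hl | hl | hl
    all_goals simp only at hl; subst hl
    · -- lab = "Falso": the Verdadeiro and Enganoso scans find nothing
      have hv : fcVerdadeiro.any (fun w => PySem.Str.startswith (PySem.Str.lower texto) w) = false := by
        rw [List.any_eq_false]
        intro w hw hs
        exact absurd (hsame w "Verdadeiro" (fcMemV w hw) hs) (by decide)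
      have he : fcEnganoso.any (fun w => PySem.Str.startswith (PySem.Str.lower texto) w) = false := by
        rw [List.any_eq_false]
        intro w hw hs
        exact absurd (hsame w "Enganoso" (fcMemE w hw) hs) (by decide)
      have hf : fcFalso.any (fun w => PySem.Str.startswith (PySem.Str.lower texto) w) = true :=
        List.any_eq_true.mpr ⟨kw, fcLabelF (kw, "Falso") hmem rfl, hsw⟩
      simp only [fcClassificar, hv, he, hf]
      simp
    · -- lab = "Enganoso": the Verdadeiro scan finds nothing
      have hv : fcVerdadeiro.any (fun w => PySem.Str.startswith (PySem.Str.lower texto) w) = false := by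
        rw [List.any_eq_false]
        intro w hw hs
        exact absurd (hsame w "Verdadeiro" (fcMemV w hw) hs) (by decide)
      have he : fcEnganoso.any (fun w => PySem.Str.startswith (PySem.Str.lower texto) w) = true :=
        List.any_eq_true.mpr ⟨kw, fcLabelE (kw, "Enganoso") hmem rfl, hsw⟩
      simp only [fcClassificar, hv, he]
      simp
    · -- lab = "Verdadeiro"
      have hv : fcVerdadeiro.any (fun w => PySem.Str.startswith (PySem.Str.lower texto) w) = true :=
        List.any_eq_true.mpr ⟨kw, fcLabelV (kw, "Verdadeiro") hmem rfl, hsw⟩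
      simp only [fcClassificar, hv]
      simp

-- the matching items with their first-hit labels, in input order
def fcMatched (l : List (String × String)) : List (String × String) :=
  l.filterMap (fun kv => (fcFirstHit (PySem.Str.lower kv.2)).map (fun jl => (kv.1, jl.2)))

-- the bucket of keyword j: the items whose FIRST matching keyword is j, with j's label
def fcBucket (j : Nat) (l : List (String × String)) : List (String × String) :=
  l.filterMap (fun kv => (fcFirstHit (PySem.Str.lower kv.2)).bind
    (fun jl => if jl.1 = j then some (kv.1, jl.2) else none))

lemma fcBucket_nil (j : Nat) : fcBucket j [] = [] := rfl

lemma fcBucket_cons_hit (j : Nat) (lab : String) (kv : String × String)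
    (l : List (String × String)) (h : fcFirstHit (PySem.Str.lower kv.2) = some (j, lab)) :
    fcBucket j (kv :: l) = (kv.1, lab) :: fcBucket j l := by
  simp [fcBucket, List.filterMap_cons, h]

lemma fcBucket_cons_miss (j : Nat) (kv : String × String) (l : List (String × String))
    (h : ∀ lab, fcFirstHit (PySem.Str.lower kv.2) ≠ some (j, lab)) :
    fcBucket j (kv :: l) = fcBucket j l := by
  cases hfh : fcFirstHit (PySem.Str.lower kv.2) with
  | none => simp [fcBucket, List.filterMap_cons, hfh]
  | some jl =>
    have : jl.1 ≠ j := by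
      intro hj
      exact h jl.2 (by rw [hfh]; rw [← hj])
    simp [fcBucket, List.filterMap_cons, hfh, this]

lemma mem_fcBucket (j : Nat) (l : List (String × String)) (k w : String) :
    (k, w) ∈ fcBucket j l ↔
      ∃ kv ∈ l, kv.1 = k ∧ fcFirstHit (PySem.Str.lower kv.2) = some (j, w) := by
  constructor
  · intro h
    simp only [fcBucket, List.mem_filterMap] at h
    obtain ⟨kv, hkv, hbind⟩ := h
    cases hfh : fcFirstHit (PySem.Str.lower kv.2) with
    | none => simp [hfh] at hbind
    | some jl =>
      simp [hfh] at hbind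
      by_cases hj : jl.1 = j
      · simp [hj] at hbind
        exact ⟨kv, hkv, hbind.1, by rw [hfh]; rw [show jl = (j, w) from Prod.ext hj hbind.2]⟩
      · simp [hj] at hbind
  · rintro ⟨kv, hkv, hk, hfh⟩
    simp only [fcBucket, List.mem_filterMap]
    exact ⟨kv, hkv, by simp [hfh, hk]⟩

lemma fcBucket_map_fst_sublist (j : Nat) (l : List (String × String)) :
    List.Sublist ((fcBucket j l).map Prod.fst) (l.map Prod.fst) := by
  induction l with
  | nil => simp [fcBucket_nil]
  | cons kv l ih =>
    cases hfh : fcFirstHit (PySem.Str.lower kv.2) with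
    | none =>
      rw [fcBucket_cons_miss j kv l (by simp [hfh])]
      exact ih.trans (List.sublist_cons_self _ _)
    | some jl =>
      by_cases hj : jl.1 = j
      · rw [fcBucket_cons_hit j jl.2 kv l (by rw [hfh, ← hj])]
        simp only [List.map_cons]
        exact List.Sublist.cons₂ kv.1 ih
      · rw [fcBucket_cons_miss j kv l ?_]
        · exact ih.trans (List.sublist_cons_self _ _)
        · intro lab hcon
          rw [hfh] at hcon
          exact hj (by injection hcon with h'; exact congrArg Prod.fst h')

-- A's dict keys are its items' first components (definitional)
lemma dict_keys_eq_items_map (d : PySem.Dict String String) :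
    d.keys = d.items.map Prod.fst := rfl

-- inserting a binding that is already present leaves the dict unchanged
lemma dict_insert_of_mem_items (d : PySem.Dict String String) (k v : String)
    (hnd : d.keys.Nodup) (hm : (k, v) ∈ d.items) : d.insert k v = d := by
  have hc : d.contains k = true := (PySem.Dict.contains_iff_mem_keys d k).mpr
    (PySem.Dict.mem_keys_of_mem_items d hm)
  apply PySem.Dict.ext
  rw [PySem.Dict.items_insert_of_contains d v hc]
  have : ∀ p ∈ d.items, (if (p.1 == k) = true then (k, v) else p) = p := by
    intro p hp
    by_cases hpk : p.1 = k
    · have h1 := PySem.Dict.get?_of_mem_items d hm hnd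
      have h2 := PySem.Dict.get?_of_mem_items d (show (p.1, p.2) ∈ d.items by simpa using hp) hnd
      rw [hpk, h1] at h2
      simp only [hpk, BEq.rfl, if_true]
      exact (Prod.ext hpk (by injection h2 with h3; exact h3.symm)).symm
    · simp [hpk]
  rw [List.map_congr_left this]
  simp

-- ONE of A's keyword passes appends exactly the bucket of that keyword
lemma fcOnePass (n : Nat) (kw lab : String) (hk : fcKeywords[n]? = some (kw, lab)) :
    ∀ (l : List (String × String)) (d : PySem.Dict String String),
      d.keys.Nodup →
      (l.map Prod.fst).Nodup →
      (∀ kv ∈ l, PySem.Str.startswith (PySem.Str.lower kv.2) kw = true →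
          (∃ lab', fcFirstHit (PySem.Str.lower kv.2) = some (n, lab')) ∨ (kv.1, lab) ∈ d.items) →
      (∀ kv ∈ l, (∃ lab', fcFirstHit (PySem.Str.lower kv.2) = some (n, lab')) →
          d.contains kv.1 = false) →
      (l.foldl (fun d kv =>
          if PySem.Str.startswith (PySem.Str.lower kv.2) kw then d.insert kv.1 lab else d)
        d).items = d.items ++ fcBucket n l := by
  intro l
  induction l with
  | nil => intro d _ _ _ _; simp [fcBucket_nil]
  | cons kv rest ih =>
    intro d hdn hl hmem hfresh
    have hkvmem : kv ∈ kv :: rest := List.mem_cons_self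
    have hl' : (rest.map Prod.fst).Nodup ∧ kv.1 ∉ rest.map Prod.fst := by
      simp only [List.map_cons, List.nodup_cons] at hl
      exact ⟨hl.2, hl.1⟩
    simp only [List.foldl_cons]
    by_cases hsw : PySem.Str.startswith (PySem.Str.lower kv.2) kw = true
    · obtain ⟨j', lab0, hfh, hj'n⟩ :=
        fcFirstHit_some_of_match (PySem.Str.lower kv.2) n kw lab hk hsw
      by_cases hjn : j' = n
      · rw [hjn] at hfh
        have hlab : lab0 = lab := by
          obtain ⟨kw0, hget0, _⟩ := fcFirstHit_spec _ _ _ hfh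
          rw [hk] at hget0
          injection hget0 with h'
          exact (congrArg Prod.snd h').symm
        subst hlab
        have hcont : d.contains kv.1 = false := hfresh kv hkvmem ⟨lab0, hfh⟩
        rw [if_pos hsw]
        have hins := PySem.Dict.items_insert_of_not_contains d lab0 hcont
        have ihres := ih (d.insert kv.1 lab0)
          (PySem.Dict.nodup_keys_insert d kv.1 lab0 hdn) hl'.1
          (by
            intro kv' hkv' hsw'
            rcases hmem kv' (List.mem_cons_of_mem kv hkv') hsw' with h | h
            · exact Or.inl h
            · exact Or.inr (by rw [hins]; exact List.mem_append_left _ h))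
          (by
            intro kv' hkv' hhit
            rw [PySem.Dict.contains_insert]
            have h1 : kv'.1 ≠ kv.1 := by
              intro hcon
              exact hl'.2 (hcon ▸ (List.mem_map_of_mem hkv'))
            have h2 : d.contains kv'.1 = false :=
              hfresh kv' (List.mem_cons_of_mem kv hkv') hhit
            simp [h1, h2])
        rw [ihres, hins, fcBucket_cons_hit n lab0 kv rest hfh]
        simp [List.append_assoc]
      · have hm := hmem kv hkvmem hsw
        rcases hm with ⟨lab', hfh'⟩ | hmemd
        · rw [hfh] at hfh'
          exact absurd (by injection hfh' with h'; exact congrArg Prod.fst h') hjn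
        · rw [if_pos hsw, dict_insert_of_mem_items d kv.1 lab hdn hmemd]
          rw [ih d hdn hl'.1
            (fun kv' hkv' hsw' => hmem kv' (List.mem_cons_of_mem kv hkv') hsw')
            (fun kv' hkv' hhit => hfresh kv' (List.mem_cons_of_mem kv hkv') hhit),
            fcBucket_cons_miss n kv rest ?_]
          intro lab' hcon
          rw [hfh] at hcon
          exact hjn (by injection hcon with h'; exact congrArg Prod.fst h')
    · rw [if_neg hsw]
      rw [ih d hdn hl'.1
        (fun kv' hkv' hsw' => hmem kv' (List.mem_cons_of_mem kv hkv') hsw')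
        (fun kv' hkv' hhit => hfresh kv' (List.mem_cons_of_mem kv hkv') hhit),
        fcBucket_cons_miss n kv rest ?_]
      intro lab' hcon
      obtain ⟨kw0, hget0, hsw0⟩ := fcFirstHit_spec _ _ _ hcon
      rw [hk] at hget0
      have : kw0 = kw := by injection hget0 with h'; exact (congrArg Prod.fst h').symm
      rw [this] at hsw0
      exact hsw hsw0

-- a key whose first hit is keyword n does not occur among the first n buckets
lemma fcNotMemPrefix (l : List (String × String)) (hl : (l.map Prod.fst).Nodup)
    (n : Nat) (kv : String × String) (hkv : kv ∈ l) (lab' : String)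
    (hfh : fcFirstHit (PySem.Str.lower kv.2) = some (n, lab')) :
    kv.1 ∉ (((List.range n).map (fun j => fcBucket j l)).flatten).map Prod.fst := by
  intro hmem
  obtain ⟨p, hp, hp1⟩ := List.mem_map.mp hmem
  obtain ⟨b, hb, hpb⟩ := List.mem_flatten.mp hp
  obtain ⟨j, hj, hbj⟩ := List.mem_map.mp hb
  have hjn : j < n := List.mem_range.mp hj
  subst hbj
  obtain ⟨kv', hkv', hk1, hfh'⟩ :=
    (mem_fcBucket j l p.1 p.2).mp (by simpa using hpb)
  have heq : kv' = kv :=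
    List.inj_on_of_nodup_map hl hkv' hkv (by rw [hk1, hp1])
  rw [heq, hfh] at hfh'
  have : n = j := by injection hfh' with h'; exact congrArg Prod.fst h'
  omega

-- after the first n keyword passes the dict is the concatenation of the first n buckets
lemma fcPassPrefix (l : List (String × String)) (hl : (l.map Prod.fst).Nodup) :
    ∀ n, n ≤ 14 →
      ((fcKeywords.take n).foldl (fun d p =>
          l.foldl (fun d kv =>
            if PySem.Str.startswith (PySem.Str.lower kv.2) p.1 then d.insert kv.1 p.2 else d) d)
        PySem.Dict.empty).items = ((List.range n).map (fun j => fcBucket j l)).flatten ∧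
      ((fcKeywords.take n).foldl (fun d p =>
          l.foldl (fun d kv =>
            if PySem.Str.startswith (PySem.Str.lower kv.2) p.1 then d.insert kv.1 p.2 else d) d)
        PySem.Dict.empty).keys.Nodup := by
  intro n
  induction n with
  | zero =>
    intro _
    exact ⟨rfl, by simp [dict_keys_eq_items_map]⟩
  | succ n ihn =>
    intro hn1
    have hn : n < 14 := by omega
    obtain ⟨ih1, ih2⟩ := ihn (by omega)
    have hlen : fcKeywords.length = 14 := rfl
    have hget : fcKeywords[n]? = some fcKeywords[n] :=
      List.getElem?_eq_getElem (by omega)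
    have htake : fcKeywords.take (n + 1) = fcKeywords.take n ++ [fcKeywords[n]] := by
      rw [List.take_add_one, hget]
      rfl
    have hk : fcKeywords[n]? = some (fcKeywords[n].1, fcKeywords[n].2) := by
      rw [hget]
    rw [htake, List.foldl_append, List.foldl_cons, List.foldl_nil]
    have hone := fcOnePass n fcKeywords[n].1 fcKeywords[n].2 hk l _ ih2 hl
      (by
        intro kv hkv hsw
        obtain ⟨j, lab0, hfh, hjn⟩ :=
          fcFirstHit_some_of_match (PySem.Str.lower kv.2) n fcKeywords[n].1 fcKeywords[n].2 hk hsw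
        by_cases hjeq : j = n
        · exact Or.inl ⟨lab0, hjeq ▸ hfh⟩
        · right
          have hjlt : j < n := lt_of_le_of_ne hjn hjeq
          obtain ⟨kwj, hgetj, hswj⟩ := fcFirstHit_spec _ _ _ hfh
          have hlab : lab0 = fcKeywords[n].2 :=
            fcCat (PySem.Str.lower kv.2) kwj lab0 fcKeywords[n].1 fcKeywords[n].2
              (List.mem_of_getElem? hgetj) (List.mem_of_getElem? hk) hswj hsw
          have hmemb : (kv.1, lab0) ∈ fcBucket j l :=
            (mem_fcBucket j l kv.1 lab0).mpr ⟨kv, hkv, rfl, hfh⟩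
          rw [ih1, ← hlab]
          exact List.mem_flatten.mpr
            ⟨fcBucket j l, List.mem_map_of_mem (List.mem_range.mpr hjlt), hmemb⟩)
      (by
        intro kv hkv hhit
        obtain ⟨lab', hfh⟩ := hhit
        cases hc : (((fcKeywords.take n).foldl (fun d p =>
            l.foldl (fun d kv =>
              if PySem.Str.startswith (PySem.Str.lower kv.2) p.1 then d.insert kv.1 p.2 else d) d)
          PySem.Dict.empty)).contains kv.1 with
        | false => rfl
        | true =>
          exfalso
          have hmemk := (PySem.Dict.contains_iff_mem_keys _ _).mp hc
          rw [dict_keys_eq_items_map, ih1] at hmemk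
          exact fcNotMemPrefix l hl n kv hkv lab' hfh hmemk)
    constructor
    · rw [hone, ih1, List.range_succ]
      simp
    · rw [dict_keys_eq_items_map, hone, List.map_append]
      apply List.Nodup.append
      · rw [← dict_keys_eq_items_map]
        exact ih2
      · exact (fcBucket_map_fst_sublist n l).nodup hl
      · intro x hx1 hx2
        obtain ⟨p, hp, hp1⟩ := List.mem_map.mp hx2
        obtain ⟨kv, hkv, hk1, hfh⟩ :=
          (mem_fcBucket n l p.1 p.2).mp (by simpa using hp)
        have : kv.1 ∈ (((List.range n).map (fun j => fcBucket j l)).flatten).map Prod.fst := by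
          rw [hk1, hp1, ← ih1, ← dict_keys_eq_items_map]
          exact hx1
        exact fcNotMemPrefix l hl n kv hkv p.2 hfh this

-- A is the fold of the 14 keyword passes (definitional regrouping of the three blocks)
lemma fcA_eq_foldK (l : List (String × String)) :
    tratarVereditos l = (fcKeywords.foldl (fun d p =>
      l.foldl (fun d kv =>
        if PySem.Str.startswith (PySem.Str.lower kv.2) p.1 then d.insert kv.1 p.2 else d) d)
      PySem.Dict.empty).items := by
  simp only [tratarVereditos, fcPass, fcKeywords, fcFalso, fcEnganoso, fcVerdadeiro,
    List.foldl_cons, List.foldl_nil]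

-- fcRanks on a cons, in both cases of the first hit
lemma fcRanks_cons_none (kv : String × String) (l : List (String × String))
    (h : fcFirstHit (PySem.Str.lower kv.2) = none) : fcRanks (kv :: l) = fcRanks l := by
  simp [fcRanks, List.filterMap_cons, h]

lemma fcRanks_cons_some (kv : String × String) (l : List (String × String)) (j : Nat)
    (lab : String) (h : fcFirstHit (PySem.Str.lower kv.2) = some (j, lab)) :
    fcRanks (kv :: l) = j :: fcRanks l := by
  simp [fcRanks, List.filterMap_cons, h]

-- a rank that occurs in no item's first hit has an empty bucket
lemma fcBucket_eq_nil (j : Nat) (l : List (String × String)) (hj : j ∉ fcRanks l) :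
    fcBucket j l = [] := by
  induction l with
  | nil => exact fcBucket_nil j
  | cons kv l ih =>
    cases hfh : fcFirstHit (PySem.Str.lower kv.2) with
    | none =>
      rw [fcBucket_cons_miss j kv l (by simp [hfh])]
      exact ih (by rwa [fcRanks_cons_none kv l hfh] at hj)
    | some jl =>
      rw [fcRanks_cons_some kv l jl.1 jl.2 (by rw [hfh])] at hj
      have hj1 : j ≠ jl.1 := fun hc => hj (hc ▸ List.mem_cons_self)
      rw [fcBucket_cons_miss j kv l ?_]
      · exact ih (fun hc => hj (List.mem_cons_of_mem _ hc))
      · intro lab hcon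
        rw [hfh] at hcon
        exact hj1 (by injection hcon with h'; exact (congrArg Prod.fst h').symm)

-- prepending an item whose first hit is j0 prepends its pair to the flattened buckets,
-- provided every bucket strictly before j0 is empty
lemma fcFlatten_cons (js : List Nat) (hst : js.Pairwise (· < ·)) (kv : String × String)
    (l : List (String × String)) (j0 : Nat) (lab : String)
    (hhit : fcFirstHit (PySem.Str.lower kv.2) = some (j0, lab)) (hj : j0 ∈ js)
    (hemp : ∀ j ∈ js, j < j0 → fcBucket j l = []) :
    (js.map (fun j => fcBucket j (kv :: l))).flatten =
      (kv.1, lab) :: (js.map (fun j => fcBucket j l)).flatten := by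
  induction js with
  | nil => simp at hj
  | cons j js ih =>
    have hpair := List.pairwise_cons.mp hst
    by_cases hjj : j = j0
    · subst hjj
      have hrest : ∀ j' ∈ js, fcBucket j' (kv :: l) = fcBucket j' l := by
        intro j' hj'
        have : j < j' := hpair.1 j' hj'
        refine fcBucket_cons_miss j' kv l ?_
        intro lab' hcon
        rw [hhit] at hcon
        have : j = j' := by injection hcon with h'; exact congrArg Prod.fst h'
        omega
      simp only [List.map_cons, List.flatten_cons,
        fcBucket_cons_hit j lab kv l hhit, List.map_congr_left hrest]
      rfl
    · have hj0mem : j0 ∈ js := by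
        rcases List.mem_cons.mp hj with h | h
        · exact absurd h.symm hjj
        · exact h
      have hjlt : j < j0 := hpair.1 j0 hj0mem
      have hempj : fcBucket j l = [] := hemp j List.mem_cons_self hjlt
      have hmiss : fcBucket j (kv :: l) = fcBucket j l := by
        refine fcBucket_cons_miss j kv l ?_
        intro lab' hcon
        rw [hhit] at hcon
        have : j0 = j := by injection hcon with h'; exact congrArg Prod.fst h'
        omega
      simp only [List.map_cons, List.flatten_cons, hmiss, hempj, List.nil_append]
      exact ih hpair.2 hj0mem (fun j' hj' => hemp j' (List.mem_cons_of_mem _ hj'))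

-- with the matching values in scan order, the flattened buckets ARE the matched items
lemma fcFlatten_sorted (l : List (String × String))
    (hs : (fcRanks l).Pairwise (· ≤ ·)) :
    (((List.range 14).map (fun j => fcBucket j l)).flatten) = fcMatched l := by
  induction l with
  | nil => simp [fcBucket_nil, fcMatched]
  | cons kv l ih =>
    cases hfh : fcFirstHit (PySem.Str.lower kv.2) with
    | none =>
      have hb : ∀ j ∈ List.range 14, fcBucket j (kv :: l) = fcBucket j l := by
        intro j _
        exact fcBucket_cons_miss j kv l (by simp [hfh])
      rw [List.map_congr_left hb, ih (by rwa [fcRanks_cons_none kv l hfh] at hs)]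
      simp [fcMatched, List.filterMap_cons, hfh]
    | some jl =>
      obtain ⟨j0, lab⟩ := jl
      rw [fcRanks_cons_some kv l j0 lab hfh] at hs
      have hpair := List.pairwise_cons.mp hs
      have hemp : ∀ j ∈ List.range 14, j < j0 → fcBucket j l = [] := by
        intro j _ hjlt
        refine fcBucket_eq_nil j l (fun hjr => ?_)
        exact absurd (hpair.1 j hjr) (by omega)
      rw [fcFlatten_cons (List.range 14) (List.pairwise_lt_range) kv l j0 lab hfh
        (List.mem_range.mpr (fcFirstHit_lt _ _ _ hfh)) hemp, ih hpair.2]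
      simp [fcMatched, List.filterMap_cons, hfh]

-- the matched items keep distinct keys
lemma fcMatched_map_fst_sublist (l : List (String × String)) :
    List.Sublist ((fcMatched l).map Prod.fst) (l.map Prod.fst) := by
  induction l with
  | nil => simp [fcMatched]
  | cons kv l ih =>
    cases hfh : fcFirstHit (PySem.Str.lower kv.2) with
    | none =>
      simp only [fcMatched, List.filterMap_cons, hfh, Option.map_none]
      exact ih.trans (List.sublist_cons_self _ _)
    | some jl =>
      simp only [fcMatched, List.filterMap_cons, hfh, Option.map_some, List.map_cons]
      exact List.Sublist.cons₂ kv.1 ih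

-- B's single pass is the fold of plain inserts over the matched items
lemma fcB_fold (l : List (String × String)) :
    ∀ d : PySem.Dict String String,
      l.foldl (fun d kv =>
        match fcClassificar kv.2 with
        | some rotulo => d.insert kv.1 rotulo
        | none => d) d =
      (fcMatched l).foldl (fun d kv => d.insert kv.1 kv.2) d := by
  induction l with
  | nil => intro d; simp [fcMatched]
  | cons kv l ih =>
    intro d
    simp only [List.foldl_cons, fcClassificar_eq kv.2]
    cases hfh : fcFirstHit (PySem.Str.lower kv.2) with
    | none =>
      simp only [hfh, Option.map_none]
      rw [ih d]
      simp [fcMatched, List.filterMap_cons, hfh]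
    | some jl =>
      simp only [hfh, Option.map_some]
      rw [ih (d.insert kv.1 jl.2)]
      simp [fcMatched, List.filterMap_cons, hfh]

-- ===== VERDICT (by name: the statement is the Claim_ definition above) =====
theorem tratarVereditos_spec : Claim_equal_tratarVereditos := by
  intro l _ hpre
  obtain ⟨hl, hsort⟩ := hpre
  obtain ⟨hA, _⟩ := fcPassPrefix l hl 14 (le_refl _)
  have htake : fcKeywords.take 14 = fcKeywords := rfl
  rw [htake] at hA
  show tratarVereditos l = tratarVereditos_alt l
  have hAeq : tratarVereditos l = fcMatched l := by
    rw [fcA_eq_foldK, hA, fcFlatten_sorted l hsort]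
  have hnodM : ((fcMatched l).map Prod.fst).Nodup := (fcMatched_map_fst_sublist l).nodup hl
  have hfold := PySem.Dict.items_foldl_insert_fresh (fcMatched l) Prod.fst Prod.snd
    PySem.Dict.empty (fun a _ => by simp [PySem.Dict.contains_empty]) hnodM
  show tratarVereditos l
    = ((l.foldl (fun d kv =>
        match fcClassificar kv.2 with
        | some rotulo => d.insert kv.1 rotulo
        | none => d) PySem.Dict.empty)).items
  rw [fcB_fold l PySem.Dict.empty, hfold, hAeq]
  have : PySem.Dict.empty.items = ([] : List (String × String)) := rfl
  rw [this]
  simp
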